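-- pv_equiv track=rewrite | github.com/pypi-data/pypi-mirror-315 | packages/multilingual-ime/multilingual_ime-0.1.4a1.tar.gz/multilingual_ime-0.1.4a1/multilingual_ime/trie.py | modified_levenshtein_distance
-- ===== SOURCE A (Python) =====
-- def modified_levenshtein_distance(s1: str, s2: str) -> int:
--     """
--     Calculate the modified Levenshtein distance between two strings.
--     The modified Levenshtein distance is the minimum number of single-character edits (insertions, deletions, substitutions, or swaps) required to change one word into the other.
--     The difference between the modified Levenshtein distance and the original Levenshtein distance is that the modified Levenshtein distance allows for swapping two adjacent characters.
--     Args: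
--         s1 (str): The first string.
--         s2 (str): The second string.
--
--     Returns:
--         int: The modified Levenshtein distance between the two strings.
--
--     Examples:
--         >>> modified_levenshtein_distance("abc", "abcc")  # 1
--         >>> modified_levenshtein_distance("abc", "acb")  # 1
--         >>> modified_levenshtein_distance("flaw", "lawn")  # 2
--         >>> modified_levenshtein_distance("kitten", "sitting")  # 3
--     """
--
--     if len(s1) < len(s2):
--         return modified_levenshtein_distance(s2, s1)
--
--     if len(s2) == 0:
--         return len(s1)
--
--     previous_row = list(range(len(s2) + 1))
--
--     for i, char1 in enumerate(s1):
--         current_row = [i + 1]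
--
--         for j, char2 in enumerate(s2):
--             insertions = previous_row[j + 1] + 1
--             deletions = current_row[j] + 1
--             # substitutions = previous_row[j] + (char1 != char2)
--             if char1 != char2:
--                 if i > 0 and j > 0 and s1[i - 1] == char2 and s1[i] == char1:
--                     substitutions = previous_row[j - 1]
--                 else:
--                     substitutions = previous_row[j] + 1
--             else:
--                 substitutions = previous_row[j]
--
--             current_row.append(min(insertions, deletions, substitutions))
--
--         previous_row = current_row
--
--     return previous_row[-1]
-- ===== SOURCE B (Python) =====
-- def modified_levenshtein_distance(s1: str, s2: str) -> int:
--     if len(s1) < len(s2):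
--         return modified_levenshtein_distance(s2, s1)
--     if len(s2) == 0:
--         return len(s1)
--     memo = {}
--
--     def d(i, j):
--         if j == 0:
--             return i
--         if i == 0:
--             return j
--         key = (i, j)
--         if key in memo:
--             return memo[key]
--         if s1[i - 1] == s2[j - 1]:
--             sub = d(i - 1, j - 1)
--         elif i >= 2 and j >= 2 and s1[i - 2] == s2[j - 1]:
--             sub = d(i - 1, j - 2)
--         else:
--             sub = d(i - 1, j - 1) + 1
--         res = min(d(i - 1, j) + 1, d(i, j - 1) + 1, sub)
--         memo[key] = res
--         return res
--
--     return d(len(s1), len(s2))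
-- ===== Notes on version B (the rewrite author's own statement) =====
-- stated objective: alternative
-- what changed: Replaced A's bottom-up row-by-row DP (rebuilding a previous_row/current_row list per character) with a top-down memoised recursion over prefix lengths D(I,J), keeping A's length-swap and empty-string guards.
import Mathlib
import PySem

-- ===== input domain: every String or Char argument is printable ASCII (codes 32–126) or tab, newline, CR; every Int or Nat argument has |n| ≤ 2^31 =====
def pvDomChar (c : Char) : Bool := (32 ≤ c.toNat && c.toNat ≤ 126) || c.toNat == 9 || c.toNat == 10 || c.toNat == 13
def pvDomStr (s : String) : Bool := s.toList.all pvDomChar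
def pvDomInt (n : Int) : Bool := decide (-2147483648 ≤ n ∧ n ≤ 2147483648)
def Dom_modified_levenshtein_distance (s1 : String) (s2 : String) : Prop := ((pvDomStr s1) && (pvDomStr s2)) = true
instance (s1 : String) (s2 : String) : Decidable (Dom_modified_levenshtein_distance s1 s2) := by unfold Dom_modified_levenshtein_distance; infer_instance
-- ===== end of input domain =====

-- B replaces A's bottom-up row DP with top-down memoised recursion over prefix lengths (same asymptotic cost; objective: alternative decomposition).

-- ===== PORT A =====
-- A's nested loops: previous_row over s2-prefixes, rebuilt once per character of s1.
def pvRowsA (l1 l2 : List Char) : List Int :=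
  (List.range l1.length).foldl (fun previous_row i =>
    let char1 := l1.getD i ' '
    (List.range l2.length).foldl (fun current_row j =>
      let char2 := l2.getD j ' '
      let insertions := previous_row.getD (j + 1) 0 + 1
      let deletions := current_row.getD j 0 + 1
      let substitutions :=
        if char1 ≠ char2 then
          if 0 < i ∧ 0 < j ∧ l1.getD (i - 1) ' ' = char2 ∧ l1.getD i ' ' = char1 then
            previous_row.getD (j - 1) 0
          else previous_row.getD j 0 + 1
        else previous_row.getD j 0
      current_row ++ [min (min insertions deletions) substitutions])
      [(i : Int) + 1])
    (List.map (fun k : Nat => (k : Int)) (List.range (l2.length + 1)))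

def modified_levenshtein_distance (s1 : String) (s2 : String) : Int :=
  if h : s1.toList.length < s2.toList.length then
    modified_levenshtein_distance s2 s1
  else if s2.toList.length = 0 then
    (s1.toList.length : Int)
  else
    let final := pvRowsA s1.toList s2.toList
    final.getD (final.length - 1) 0
termination_by s2.toList.length

-- ===== PORT B =====
-- Source B's helper d(i, j) with its memo dict threaded through (state-passing rendering of the closure's mutable memo).
def pvAltGo (l1 l2 : List Char) (i j : Nat) (memo : PySem.Dict (Nat × Nat) Int) :
    Int × PySem.Dict (Nat × Nat) Int :=
  if hj : j = 0 then ((i : Int), memo)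
  else if hi : i = 0 then ((j : Int), memo)
  else
    match memo.get? (i, j) with
    | some v => (v, memo)
    | none =>
      let sm :=
        if l1.getD (i - 1) ' ' = l2.getD (j - 1) ' ' then pvAltGo l1 l2 (i - 1) (j - 1) memo
        else if 2 ≤ i ∧ 2 ≤ j ∧ l1.getD (i - 2) ' ' = l2.getD (j - 1) ' ' then
          pvAltGo l1 l2 (i - 1) (j - 2) memo
        else
          let r := pvAltGo l1 l2 (i - 1) (j - 1) memo
          (r.1 + 1, r.2)
      let am := pvAltGo l1 l2 (i - 1) j sm.2
      let bm := pvAltGo l1 l2 i (j - 1) am.2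
      let res := min (min (am.1 + 1) (bm.1 + 1)) sm.1
      (res, bm.2.insert (i, j) res)
termination_by i + j
decreasing_by all_goals omega

def modified_levenshtein_distance_alt (s1 : String) (s2 : String) : Int :=
  if h : s1.toList.length < s2.toList.length then
    modified_levenshtein_distance_alt s2 s1
  else if s2.toList.length = 0 then
    (s1.toList.length : Int)
  else
    (pvAltGo s1.toList s2.toList s1.toList.length s2.toList.length PySem.Dict.empty).1
termination_by s2.toList.length

-- ===== PRECONDITION & SPEC =====
def Spec_modified_levenshtein_distance (s1 : String) (s2 : String) (out : Int) : Prop := out = modified_levenshtein_distance_alt s1 s2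
instance (s1 : String) (s2 : String) (out : Int) : Decidable (Spec_modified_levenshtein_distance s1 s2 out) := by unfold Spec_modified_levenshtein_distance; infer_instance

-- ===== CLAIM (what is proved, stated in full; the proofs are below) =====
def Claim_equal_modified_levenshtein_distance : Prop := ∀ (s1 : String) (s2 : String), Dom_modified_levenshtein_distance s1 s2 → Spec_modified_levenshtein_distance s1 s2 (modified_levenshtein_distance s1 s2)

-- ===== LEMMAS AND PROOFS =====

-- Pure (memo-free) value of Source B's recursion: the reference both ports are related to.
def pvD (l1 l2 : List Char) : Nat → Nat → Int
  | i, 0 => (i : Int)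
  | 0, j + 1 => ((j + 1 : Nat) : Int)
  | i + 1, j + 1 =>
    let sub :=
      if l1.getD i ' ' = l2.getD j ' ' then pvD l1 l2 i j
      else if 2 ≤ i + 1 ∧ 2 ≤ j + 1 ∧ l1.getD (i - 1) ' ' = l2.getD j ' ' then
        pvD l1 l2 i (j - 1)
      else pvD l1 l2 i j + 1
    min (min (pvD l1 l2 i (j + 1) + 1) (pvD l1 l2 (i + 1) j + 1)) sub
termination_by i j => i + j
decreasing_by all_goals omega

lemma pvD_succ (l1 l2 : List Char) (i j : Nat) :
    pvD l1 l2 (i + 1) (j + 1) =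
      min (min (pvD l1 l2 i (j + 1) + 1) (pvD l1 l2 (i + 1) j + 1))
        (if l1.getD i ' ' = l2.getD j ' ' then pvD l1 l2 i j
         else if 2 ≤ i + 1 ∧ 2 ≤ j + 1 ∧ l1.getD (i - 1) ' ' = l2.getD j ' ' then
           pvD l1 l2 i (j - 1)
         else pvD l1 l2 i j + 1) := by
  rw [pvD]

lemma pvD_zero_left (l1 l2 : List Char) (k : Nat) : pvD l1 l2 0 k = (k : Int) := by
  cases k <;> simp [pvD]

lemma pvAltGo_correct (l1 l2 : List Char) :
    ∀ n i j memo, i + j ≤ n →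
      (∀ a b v, memo.get? (a, b) = some v → v = pvD l1 l2 a b) →
      (pvAltGo l1 l2 i j memo).1 = pvD l1 l2 i j ∧
      (∀ a b v, (pvAltGo l1 l2 i j memo).2.get? (a, b) = some v → v = pvD l1 l2 a b) := by
  intro n
  induction n with
  | zero =>
    intro i j memo hle hinv
    have hi : i = 0 := by omega
    have hj : j = 0 := by omega
    subst hi; subst hj
    rw [pvAltGo]
    simp [pvD]
    exact hinv
  | succ n ih =>
    intro i j memo hle hinv
    rw [pvAltGo]
    by_cases hj : j = 0
    · subst hj; simp [pvD]; exact hinv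
    by_cases hi : i = 0
    · subst hi
      simp [hj]
      constructor
      · obtain ⟨j', rfl⟩ : ∃ j', j = j' + 1 := ⟨j - 1, by omega⟩
        simp [pvD]
      · exact hinv
    simp only [dif_neg hj, dif_neg hi]
    obtain ⟨i', rfl⟩ : ∃ i', i = i' + 1 := ⟨i - 1, by omega⟩
    obtain ⟨j', rfl⟩ : ∃ j', j = j' + 1 := ⟨j - 1, by omega⟩
    cases hmk : memo.get? (i' + 1, j' + 1) with
    | some v =>
      simp only []
      exact ⟨hinv _ _ _ hmk, hinv⟩
    | none =>
      simp only []
      set SM := (if l1.getD (i' + 1 - 1) ' ' = l2.getD (j' + 1 - 1) ' ' then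
            pvAltGo l1 l2 (i' + 1 - 1) (j' + 1 - 1) memo
          else if 2 ≤ i' + 1 ∧ 2 ≤ j' + 1 ∧ l1.getD (i' + 1 - 2) ' ' = l2.getD (j' + 1 - 1) ' ' then
            pvAltGo l1 l2 (i' + 1 - 1) (j' + 1 - 2) memo
          else
            let r := pvAltGo l1 l2 (i' + 1 - 1) (j' + 1 - 1) memo
            (r.1 + 1, r.2)) with hSM
      have hsm : SM.1 = (if l1.getD i' ' ' = l2.getD j' ' ' then pvD l1 l2 i' j'
            else if 2 ≤ i' + 1 ∧ 2 ≤ j' + 1 ∧ l1.getD (i' - 1) ' ' = l2.getD j' ' ' then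
              pvD l1 l2 i' (j' - 1)
            else pvD l1 l2 i' j' + 1) ∧
          (∀ a b v, SM.2.get? (a, b) = some v → v = pvD l1 l2 a b) := by
        rw [hSM]
        have e1 : i' + 1 - 2 = i' - 1 := by omega
        have e2 : j' + 1 - 2 = j' - 1 := by omega
        simp only [Nat.add_sub_cancel, e1, e2]
        split_ifs with h1 h2
        · exact ih i' j' memo (by omega) hinv
        · exact ih i' (j' - 1) memo (by omega) hinv
        · have := ih i' j' memo (by omega) hinv
          exact ⟨by simp [this.1], this.2⟩
      have ham := ih (i' + 1 - 1) (j' + 1) SM.2 (by omega) hsm.2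
      have hbm := ih (i' + 1) (j' + 1 - 1) (pvAltGo l1 l2 (i' + 1 - 1) (j' + 1) SM.2).2
        (by omega) ham.2
      have e0 : (i' + 1 - 1) = i' := rfl
      have e0' : (j' + 1 - 1) = j' := rfl
      have hval : min (min ((pvAltGo l1 l2 (i' + 1 - 1) (j' + 1) SM.2).1 + 1)
            ((pvAltGo l1 l2 (i' + 1) (j' + 1 - 1)
              (pvAltGo l1 l2 (i' + 1 - 1) (j' + 1) SM.2).2).1 + 1)) SM.1
          = pvD l1 l2 (i' + 1) (j' + 1) := by
        rw [ham.1, hbm.1, hsm.1, e0, e0', pvD_succ]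
      refine ⟨hval, ?_⟩
      intro a b v hv
      rw [PySem.Dict.get?_insert] at hv
      by_cases hab : (a, b) = (i' + 1, j' + 1)
      · rw [if_pos hab] at hv
        obtain ⟨rfl, rfl⟩ := Prod.mk.injEq .. |>.mp hab
        rw [← Option.some.inj hv]
        exact hval
      · rw [if_neg hab] at hv
        exact hbm.2 a b v hv

lemma getD_map_range (f : Nat → Int) (k t : Nat) (h : t < k) :
    ((List.range k).map f).getD t 0 = f t := by
  rw [List.getD_eq_getElem?_getD]
  simp [h]

lemma inner_row (l1 l2 : List Char) (m i : Nat) (prev : List Int)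
    (hprev : prev = (List.range (m + 1)).map (fun k => pvD l1 l2 i k)) :
    ∀ j, j ≤ m →
      ((List.range j).foldl (fun current_row j =>
        let char2 := l2.getD j ' '
        let insertions := prev.getD (j + 1) 0 + 1
        let deletions := current_row.getD j 0 + 1
        let substitutions :=
          if l1.getD i ' ' ≠ char2 then
            if 0 < i ∧ 0 < j ∧ l1.getD (i - 1) ' ' = char2 ∧ l1.getD i ' ' = l1.getD i ' ' then
              prev.getD (j - 1) 0
            else prev.getD j 0 + 1
          else prev.getD j 0
        current_row ++ [min (min insertions deletions) substitutions])
        [(i : Int) + 1]) = (List.range (j + 1)).map (fun k => pvD l1 l2 (i + 1) k) := by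
  intro j
  induction j with
  | zero =>
    intro _
    simp [pvD]
  | succ j ihj =>
    intro hj
    rw [List.range_succ, List.foldl_append, ihj (by omega)]
    simp only [List.foldl_cons, List.foldl_nil]
    rw [List.range_succ (n := j + 1), List.map_append]
    congr 1
    subst hprev
    rw [getD_map_range _ _ _ (by omega), getD_map_range _ _ _ (by omega),
        getD_map_range _ _ _ (by omega)]
    simp only [List.map_cons, List.map_nil, List.cons.injEq, and_true]
    rw [pvD_succ]
    congr 1
    have gj := getD_map_range (fun k => pvD l1 l2 i k) (m + 1) j (by omega)
    have gj1 := getD_map_range (fun k => pvD l1 l2 i k) (m + 1) (j - 1) (by omega)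
    clear ihj
    split_ifs with h1 h2 h3 h4
    · rfl
    · exact absurd ⟨by omega, by omega, h2.2.2⟩ h3
    · exact absurd ⟨by omega, by omega, h4.2.2⟩ h2
    · rw [gj]
    · rw [gj]
    · exact absurd (not_not.mp h1) (by assumption)
    · exact absurd (not_not.mp h1) (by assumption)

lemma outer_rows (l1 l2 : List Char) (m : Nat) (hm : m = l2.length) :
    ∀ t, ((List.range t).foldl (fun previous_row i =>
      let char1 := l1.getD i ' '
      (List.range l2.length).foldl (fun current_row j =>
        let char2 := l2.getD j ' '
        let insertions := previous_row.getD (j + 1) 0 + 1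
        let deletions := current_row.getD j 0 + 1
        let substitutions :=
          if char1 ≠ char2 then
            if 0 < i ∧ 0 < j ∧ l1.getD (i - 1) ' ' = char2 ∧ l1.getD i ' ' = char1 then
              previous_row.getD (j - 1) 0
            else previous_row.getD j 0 + 1
          else previous_row.getD j 0
        current_row ++ [min (min insertions deletions) substitutions])
        [(i : Int) + 1])
      (List.map (fun k : Nat => (k : Int)) (List.range (l2.length + 1))))
      = (List.range (m + 1)).map (fun k => pvD l1 l2 t k) := by
  subst hm
  intro t
  induction t with
  | zero =>
    simp only [List.range_zero, List.foldl_nil]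
    exact List.map_congr_left (fun k _ => (pvD_zero_left l1 l2 k).symm)
  | succ t iht =>
    rw [List.range_succ (n := t), List.foldl_append, iht, List.foldl_cons, List.foldl_nil]
    exact inner_row l1 l2 l2.length t _ rfl l2.length le_rfl

lemma pvRowsA_eq (l1 l2 : List Char) :
    pvRowsA l1 l2 = List.map (fun k => pvD l1 l2 l1.length k) (List.range (l2.length + 1)) := by
  exact outer_rows l1 l2 l2.length rfl l1.length

lemma main_eq (s1 s2 : String) (h : ¬ s1.toList.length < s2.toList.length) :
    modified_levenshtein_distance s1 s2 = modified_levenshtein_distance_alt s1 s2 := by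
  rw [modified_levenshtein_distance, modified_levenshtein_distance_alt, dif_neg h, dif_neg h]
  by_cases h0 : s2.toList.length = 0
  · rw [if_pos h0, if_pos h0]
  · rw [if_neg h0, if_neg h0]
    simp only [pvRowsA_eq, List.length_map, List.length_range, Nat.add_sub_cancel]
    rw [getD_map_range _ _ _ (by omega)]
    have := pvAltGo_correct s1.toList s2.toList
      (s1.toList.length + s2.toList.length) s1.toList.length s2.toList.length
      PySem.Dict.empty le_rfl (by
        intro a b v hv
        rw [PySem.Dict.get?_empty] at hv
        cases hv)
    rw [this.1]

-- ===== VERDICT (by name: the statement is the Claim_ definition above) =====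
theorem modified_levenshtein_distance_spec : Claim_equal_modified_levenshtein_distance := by
  intro s1 s2 _
  unfold Spec_modified_levenshtein_distance
  by_cases h : s1.toList.length < s2.toList.length
  · rw [modified_levenshtein_distance, modified_levenshtein_distance_alt, dif_pos h, dif_pos h]
    exact main_eq s2 s1 (by omega)
  · exact main_eq s1 s2 h
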